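-- pv_equiv track=rewrite | github.com/LinuxUserLost/PyChi-aiN | gui_files/shell_reporter.py | _suggest_fixes_page
-- ===== SOURCE A (Python) =====
-- def _suggest_fixes_page(page_entry, source_path):
--     """Suggest likely fix zones for page-level issues."""
--     fixes = []
--     for err in page_entry.get("errors", []):
--         if "page_id" in err:
--             fixes.append("add page_id to this page entry in pages.json")
--         elif "page_name" in err:
--             fixes.append("add page_name to this page entry in pages.json")
--         elif "page_path" in err:
--             fixes.append("add page_path to this page entry in pages.json")
--         elif "page_class" in err:
--             fixes.append("add page_class to this page entry in pages.json")
--     return fixes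
-- ===== SOURCE B (Python) =====
-- _PRIORITY = {"page_id": 0, "page_name": 1, "page_path": 2, "page_class": 3}
-- _KEYS = ["page_id", "page_name", "page_path", "page_class"]
--
-- def _suggest_fixes_page(page_entry, source_path):
--     # Invert the traversal: instead of probing the candidate keys in priority
--     # order, scan each error's own keys once, map them through a priority
--     # table, and keep the minimum priority seen; emit the message for it.
--     fixes = []
--     for err in page_entry.get("errors", []):
--         best = None
--         for k in err:
--             p = _PRIORITY.get(k)
--             if p is not None:
--                 best = p if best is None else min(best, p)
--         if best is not None:
--             fixes.append("add %s to this page entry in pages.json" % _KEYS[best])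
--     return fixes
-- ===== Notes on version B (the rewrite author's own statement) =====
-- stated objective: alternative
-- what changed: Inverts the inner traversal: instead of A's fixed elif cascade probing the four candidate keys in priority order, B scans each error's own keys once, maps them through a priority table, and keeps the minimum priority seen, then builds the message from that key.
import Mathlib
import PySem

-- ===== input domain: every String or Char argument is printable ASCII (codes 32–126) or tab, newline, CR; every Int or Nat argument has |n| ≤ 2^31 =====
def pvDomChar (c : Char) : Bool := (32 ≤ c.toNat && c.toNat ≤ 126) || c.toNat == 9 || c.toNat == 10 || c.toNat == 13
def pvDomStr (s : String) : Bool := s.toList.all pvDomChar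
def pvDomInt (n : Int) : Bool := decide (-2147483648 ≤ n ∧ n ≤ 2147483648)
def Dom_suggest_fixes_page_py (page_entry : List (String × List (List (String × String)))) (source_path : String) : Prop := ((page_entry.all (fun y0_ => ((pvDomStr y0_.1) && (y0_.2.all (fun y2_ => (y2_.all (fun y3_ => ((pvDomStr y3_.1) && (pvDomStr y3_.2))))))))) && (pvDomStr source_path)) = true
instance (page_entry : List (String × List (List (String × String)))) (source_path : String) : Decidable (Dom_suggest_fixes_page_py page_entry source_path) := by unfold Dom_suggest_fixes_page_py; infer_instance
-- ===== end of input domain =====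

-- B inverts the inner traversal: it scans each error's own keys through a priority
-- table and keeps the minimum priority, instead of A's fixed elif cascade (objective: alternative).

-- ===== PORT A =====
-- page_entry.get("errors", []): first-match association-list lookup with default []
def suggest_fixes_page_py (page_entry : List (String × List (List (String × String)))) (source_path : String) : List String :=
  let errors := ((page_entry.find? (fun kv => kv.1 == "errors")).map Prod.snd).getD []
  errors.foldl (fun fixes err =>
    if err.any (fun kv => kv.1 == "page_id") then
      fixes ++ ["add page_id to this page entry in pages.json"]
    else if err.any (fun kv => kv.1 == "page_name") then
      fixes ++ ["add page_name to this page entry in pages.json"]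
    else if err.any (fun kv => kv.1 == "page_path") then
      fixes ++ ["add page_path to this page entry in pages.json"]
    else if err.any (fun kv => kv.1 == "page_class") then
      fixes ++ ["add page_class to this page entry in pages.json"]
    else fixes) []

-- ===== PORT B =====
-- the module-level tables _PRIORITY (dict, first-match lookup) and _KEYS of Source B
def pvPriority : List (String × Nat) := [("page_id", 0), ("page_name", 1), ("page_path", 2), ("page_class", 3)]
def pvFixKeys : List String := ["page_id", "page_name", "page_path", "page_class"]

-- inner loop 'for k in err' iterates the dict's keys; _PRIORITY.get(k) is find?;
-- best is the running Option-minimum; _KEYS[best] is in-range indexing (best < 4)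
def suggest_fixes_page_py_alt (page_entry : List (String × List (List (String × String)))) (source_path : String) : List String :=
  let errors := ((page_entry.find? (fun kv => kv.1 == "errors")).map Prod.snd).getD []
  errors.foldl (fun fixes err =>
    let best := err.foldl (fun (b : Option Nat) kv =>
      match (pvPriority.find? (fun pr => pr.1 == kv.1)).map Prod.snd with
      | some p => some (match b with | none => p | some m => min m p)
      | none => b) none
    match best with
    | some i => fixes ++ ["add " ++ pvFixKeys.getD i "" ++ " to this page entry in pages.json"]
    | none => fixes) []

-- ===== PRECONDITION & SPEC =====
def Spec_suggest_fixes_page_py (page_entry : List (String × List (List (String × String)))) (source_path : String) (out : List String) : Prop := out = suggest_fixes_page_py_alt page_entry source_path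
instance (page_entry : List (String × List (List (String × String)))) (source_path : String) (out : List String) : Decidable (Spec_suggest_fixes_page_py page_entry source_path out) := by unfold Spec_suggest_fixes_page_py; infer_instance

-- ===== CLAIM (what is proved, stated in full; the proofs are below) =====
def Claim_equal_suggest_fixes_page_py : Prop := ∀ (page_entry : List (String × List (List (String × String)))) (source_path : String), Dom_suggest_fixes_page_py page_entry source_path → Spec_suggest_fixes_page_py page_entry source_path (suggest_fixes_page_py page_entry source_path)

-- ===== LEMMAS AND PROOFS =====

-- specification of B's inner fold: the elif cascade of A as an Option Nat, over four Bools
def pvSpecB (b1 b2 b3 b4 : Bool) : Option Nat :=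
  if b1 then some 0 else if b2 then some 1 else if b3 then some 2 else if b4 then some 3 else none

def pvSpec (err : List (String × String)) : Option Nat :=
  pvSpecB (err.any (fun kv => kv.1 == "page_id")) (err.any (fun kv => kv.1 == "page_name"))
          (err.any (fun kv => kv.1 == "page_path")) (err.any (fun kv => kv.1 == "page_class"))

def pvOptMin : Option Nat → Option Nat → Option Nat
  | none, b => b
  | some m, none => some m
  | some m, some n => some (min m n)

theorem pvOptMin_assoc (a b c : Option Nat) : pvOptMin (pvOptMin a b) c = pvOptMin a (pvOptMin b c) := by
  cases a <;> cases b <;> cases c <;> simp [pvOptMin, Nat.min_assoc]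

-- one fold step is pvOptMin with the priority of the entry's key
theorem pv_step_optMin (b : Option Nat) (kv : String × String) :
    (match (pvPriority.find? (fun pr => pr.1 == kv.1)).map Prod.snd with
     | some p => some (match b with | none => p | some m => min m p)
     | none => b) = pvOptMin b ((pvPriority.find? (fun pr => pr.1 == kv.1)).map Prod.snd) := by
  cases h : (pvPriority.find? (fun pr => pr.1 == kv.1)).map Prod.snd <;> cases b <;> simp [pvOptMin]

-- contribution of one entry combined with the cascade value of the rest
theorem pv_cons_spec (kv : String × String) (rest : List (String × String)) :
    pvOptMin ((pvPriority.find? (fun pr => pr.1 == kv.1)).map Prod.snd) (pvSpec rest) = pvSpec (kv :: rest) := by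
  by_cases h1 : kv.1 = "page_id"
  · simp only [pvSpec, List.any_cons, h1, pvPriority, List.find?]
    simp only [pvSpecB]
    cases rest.any (fun kv => kv.1 == "page_id") <;> cases rest.any (fun kv => kv.1 == "page_name") <;>
      cases rest.any (fun kv => kv.1 == "page_path") <;> cases rest.any (fun kv => kv.1 == "page_class") <;>
        simp [pvOptMin]
  · by_cases h2 : kv.1 = "page_name"
    · simp only [pvSpec, List.any_cons, h2, pvPriority, List.find?]
      simp only [pvSpecB]
      cases rest.any (fun kv => kv.1 == "page_id") <;> cases rest.any (fun kv => kv.1 == "page_name") <;>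
        cases rest.any (fun kv => kv.1 == "page_path") <;> cases rest.any (fun kv => kv.1 == "page_class") <;>
          simp [pvOptMin]
    · by_cases h3 : kv.1 = "page_path"
      · simp only [pvSpec, List.any_cons, h3, pvPriority, List.find?]
        simp only [pvSpecB]
        cases rest.any (fun kv => kv.1 == "page_id") <;> cases rest.any (fun kv => kv.1 == "page_name") <;>
          cases rest.any (fun kv => kv.1 == "page_path") <;> cases rest.any (fun kv => kv.1 == "page_class") <;>
            simp [pvOptMin]
      · by_cases h4 : kv.1 = "page_class"
        · simp only [pvSpec, List.any_cons, h4, pvPriority, List.find?]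
          simp only [pvSpecB]
          cases rest.any (fun kv => kv.1 == "page_id") <;> cases rest.any (fun kv => kv.1 == "page_name") <;>
            cases rest.any (fun kv => kv.1 == "page_path") <;> cases rest.any (fun kv => kv.1 == "page_class") <;>
              simp [pvOptMin]
        · have hf : (pvPriority.find? (fun pr => pr.1 == kv.1)).map Prod.snd = none := by
            have e1 : (("page_id" : String) == kv.1) = false := beq_eq_false_iff_ne.mpr (Ne.symm h1)
            have e2 : (("page_name" : String) == kv.1) = false := beq_eq_false_iff_ne.mpr (Ne.symm h2)
            have e3 : (("page_path" : String) == kv.1) = false := beq_eq_false_iff_ne.mpr (Ne.symm h3)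
            have e4 : (("page_class" : String) == kv.1) = false := beq_eq_false_iff_ne.mpr (Ne.symm h4)
            simp [pvPriority, List.find?, e1, e2, e3, e4]
          have f1 : (kv.1 == "page_id") = false := beq_eq_false_iff_ne.mpr h1
          have f2 : (kv.1 == "page_name") = false := beq_eq_false_iff_ne.mpr h2
          have f3 : (kv.1 == "page_path") = false := beq_eq_false_iff_ne.mpr h3
          have f4 : (kv.1 == "page_class") = false := beq_eq_false_iff_ne.mpr h4
          simp only [pvSpec, pvSpecB, List.any_cons, f1, f2, f3, f4, Bool.false_or, hf, pvOptMin]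

-- B's inner fold computes the minimum priority = the cascade value pvSpec
theorem pv_fold_spec (err : List (String × String)) (b : Option Nat) :
    err.foldl (fun (b : Option Nat) kv =>
      match (pvPriority.find? (fun pr => pr.1 == kv.1)).map Prod.snd with
      | some p => some (match b with | none => p | some m => min m p)
      | none => b) b = pvOptMin b (pvSpec err) := by
  induction err generalizing b with
  | nil => cases b <;> simp [pvSpec, pvSpecB, pvOptMin]
  | cons kv rest ih =>
    rw [List.foldl_cons, ih, pv_step_optMin, pvOptMin_assoc, pv_cons_spec]

-- the two loop bodies agree on every (accumulator, err) pair
theorem pv_body_eq (fixes : List String) (err : List (String × String)) :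
    (if err.any (fun kv => kv.1 == "page_id") then
      fixes ++ ["add page_id to this page entry in pages.json"]
    else if err.any (fun kv => kv.1 == "page_name") then
      fixes ++ ["add page_name to this page entry in pages.json"]
    else if err.any (fun kv => kv.1 == "page_path") then
      fixes ++ ["add page_path to this page entry in pages.json"]
    else if err.any (fun kv => kv.1 == "page_class") then
      fixes ++ ["add page_class to this page entry in pages.json"]
    else fixes)
    = (let best := err.foldl (fun (b : Option Nat) kv =>
         match (pvPriority.find? (fun pr => pr.1 == kv.1)).map Prod.snd with
         | some p => some (match b with | none => p | some m => min m p)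
         | none => b) none
       match best with
       | some i => fixes ++ ["add " ++ pvFixKeys.getD i "" ++ " to this page entry in pages.json"]
       | none => fixes) := by
  simp only [pv_fold_spec, pvOptMin, pvSpec, pvSpecB]
  cases err.any (fun kv => kv.1 == "page_id") <;> cases err.any (fun kv => kv.1 == "page_name") <;>
    cases err.any (fun kv => kv.1 == "page_path") <;> cases err.any (fun kv => kv.1 == "page_class") <;>
      simp [pvFixKeys]

-- ===== VERDICT (by name: the statement is the Claim_ definition above) =====
theorem suggest_fixes_page_py_spec : Claim_equal_suggest_fixes_page_py := by
  intro page_entry source_path _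
  unfold Spec_suggest_fixes_page_py suggest_fixes_page_py suggest_fixes_page_py_alt
  apply PySem.List.foldl_congr_mem
  intro fixes err _
  exact pv_body_eq fixes err
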